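-- pv_equiv track=rewrite | github.com/IES-Rafael-Alberti/dam1-2425-ejercicios-u2-gromber05 | src/piramide.py | piramide_inversa
-- ===== SOURCE A (Python) =====
-- def piramide_inversa(num: int):
--     serie = ''
--     total = 0
--     for i in range(num + 1):
--         total += i
--     for i in range(num + 1):
--
--         if i == num:
--             i = str(i)
--             serie += i + ' = '
--         else:
--             i = str(i)
--             serie += i + ' + '
--     return serie, str(total)
-- ===== SOURCE B (Python) =====
-- def piramide_inversa(num: int):
--     terms = [str(i) for i in range(num + 1)]
--     return ' + '.join(terms) + ' = ', str(num * (num + 1) // 2)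
-- ===== Notes on version B (the rewrite author's own statement) =====
-- stated objective: simpler
-- what changed: Replaces the two accumulation loops by the Gauss triangular-number closed form for the total and a single ' + '.join over the rendered terms for the series; Pre_ excludes negative num, an unspecified degenerate corner where A's empty ranges and B's join-based rendering return different values, neither of which is specified.
-- outside the precondition, e.g. on piramide_inversa(-3): A returns ('', '0'), B returns (' = ', '3')
import Mathlib
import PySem

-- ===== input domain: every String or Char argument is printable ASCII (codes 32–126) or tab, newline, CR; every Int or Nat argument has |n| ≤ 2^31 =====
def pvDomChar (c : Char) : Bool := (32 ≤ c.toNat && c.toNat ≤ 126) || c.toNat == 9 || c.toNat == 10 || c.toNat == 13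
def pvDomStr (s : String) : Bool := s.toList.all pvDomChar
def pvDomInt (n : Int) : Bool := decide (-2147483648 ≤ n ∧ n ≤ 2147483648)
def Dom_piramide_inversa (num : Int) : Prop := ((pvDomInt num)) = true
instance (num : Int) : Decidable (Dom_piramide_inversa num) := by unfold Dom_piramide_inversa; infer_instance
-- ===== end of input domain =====

-- B replaces A's two accumulation loops by the Gauss closed form for the sum and a single join for the series string (simpler; same return value on num >= 0).


-- ===== PORT A =====
def piramide_inversa (num : Int) : String × String :=
  let serie : String := ""
  let total : Int := 0
  let total := (PySem.List.pyRange 0 (num + 1) 1).foldl (fun t i => t + i) total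
  let serie := (PySem.List.pyRange 0 (num + 1) 1).foldl
    (fun s i =>
      if i == num then s ++ PySem.Int.toStr i ++ " = "
      else s ++ PySem.Int.toStr i ++ " + ") serie
  (serie, PySem.Int.toStr total)

-- ===== PORT B =====
def piramide_inversa_alt (num : Int) : String × String :=
  let terms := (PySem.List.pyRange 0 (num + 1) 1).map PySem.Int.toStr
  (PySem.Str.join " + " terms ++ " = ", PySem.Int.toStr (PySem.Int.floordiv (num * (num + 1)) 2))

-- ===== PRECONDITION & SPEC =====
-- Pre_ excludes negative num, an unspecified degenerate corner where A's empty ranges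
-- yield ('', '0') while B's rendering yields (' = ', str(num*(num+1)//2)); both programs
-- return, neither value is specified by the function's purpose.
def Pre_piramide_inversa (num : Int) : Prop := 0 ≤ num
instance (num : Int) : Decidable (Pre_piramide_inversa num) := by unfold Pre_piramide_inversa; infer_instance
def pvWitness_piramide_inversa : Int := 5

def Spec_piramide_inversa (num : Int) (out : String × String) : Prop := out = piramide_inversa_alt num
instance (num : Int) (out : String × String) : Decidable (Spec_piramide_inversa num out) := by unfold Spec_piramide_inversa; infer_instance

-- ===== CLAIM =====
def Claim_equal_piramide_inversa : Prop := ∀ (num : Int), Dom_piramide_inversa num → Pre_piramide_inversa num → Spec_piramide_inversa num (piramide_inversa num)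

-- ===== LEMMAS AND PROOFS =====

-- String equality via character lists (Lean's String.append is opaque; we compare toList).
theorem pv_str_ext {s t : String} (h : s.toList = t.toList) : s = t := by
  rw [← String.ofList_toList (s := s), ← String.ofList_toList (s := t), h]

-- Gauss: A's summation fold equals the closed form n*(n+1)/2.
theorem pv_sum_fold (n : Nat) :
    (PySem.List.pyRange 0 ((n : Int) + 1) 1).foldl (fun t i => t + i) 0
      = ((n * (n + 1) / 2 : Nat) : Int) := by
  induction n with
  | zero => decide
  | succ m ih =>
      have hsplit : PySem.List.pyRange 0 (((m + 1 : Nat) : Int) + 1) 1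
          = PySem.List.pyRange 0 ((m : Int) + 1) 1 ++ [((m : Int) + 1)] := by
        push_cast
        exact PySem.List.pyRange_one_succ_right (by positivity)
      rw [hsplit, List.foldl_append, ih]
      simp only [List.foldl_cons, List.foldl_nil]
      have hm : (m + 1) * (m + 1 + 1) = m * (m + 1) + 2 * (m + 1) := by ring
      have h2 : m * (m + 1) / 2 + (m + 1) = (m + 1) * (m + 1 + 1) / 2 := by omega
      push_cast [← h2]
      ring

-- ' + '.join over a list with its last element peeled off.
theorem pv_join_snoc (l : List String) (a x : String) :
    PySem.Str.join " + " ((a :: l) ++ [x])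
      = PySem.Str.join " + " (a :: l) ++ " + " ++ x := by
  induction l generalizing a with
  | nil =>
      apply pv_str_ext
      simp [PySem.Str.toList_join, String.toList_append,
        PySem.Chars.join_cons_cons, PySem.Chars.join_singleton]
  | cons b t ih =>
      have h1 : PySem.Str.join " + " ((a :: b :: t) ++ [x])
          = a ++ " + " ++ PySem.Str.join " + " ((b :: t) ++ [x]) := by
        apply pv_str_ext
        simp [PySem.Str.toList_join, String.toList_append, PySem.Chars.join_cons_cons]
      have h2 : PySem.Str.join " + " (a :: b :: t)
          = a ++ " + " ++ PySem.Str.join " + " (b :: t) := by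
        apply pv_str_ext
        simp [PySem.Str.toList_join, String.toList_append, PySem.Chars.join_cons_cons]
      rw [h1, ih b, h2]
      simp [String.append_assoc]

-- A's series fold (with the '+'-branch only) followed by the last term equals the join of all terms.
theorem pv_serie_fold (n : Nat) :
    (PySem.List.pyRange 0 (n : Int) 1).foldl
        (fun s i => s ++ PySem.Int.toStr i ++ " + ") "" ++ PySem.Int.toStr (n : Int)
      = PySem.Str.join " + " ((PySem.List.pyRange 0 ((n : Int) + 1) 1).map PySem.Int.toStr) := by
  induction n with
  | zero =>
      apply pv_str_ext
      simp [PySem.List.pyRange, PySem.Str.toList_join, PySem.Chars.join_singleton]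
  | succ m ih =>
      have hsplit : PySem.List.pyRange 0 ((m + 1 : Nat) : Int) 1
          = PySem.List.pyRange 0 ((m : Int)) 1 ++ [(m : Int)] := by
        push_cast
        exact PySem.List.pyRange_one_succ_right (by positivity)
      have hsplit2 : PySem.List.pyRange 0 (((m + 1 : Nat) : Int) + 1) 1
          = PySem.List.pyRange 0 ((m : Int) + 1) 1 ++ [((m : Int) + 1)] := by
        push_cast
        exact PySem.List.pyRange_one_succ_right (by positivity)
      rw [hsplit, hsplit2, List.foldl_append]
      simp only [List.foldl_cons, List.foldl_nil, List.map_append, List.map_cons, List.map_nil]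
      rcases hl : (PySem.List.pyRange 0 ((m : Int) + 1) 1).map PySem.Int.toStr with _ | ⟨a, l⟩
      · exfalso
        have h0 : (0 : Int) ∈ PySem.List.pyRange 0 ((m : Int) + 1) 1 := by
          rw [PySem.List.mem_pyRange_one]; constructor <;> omega
        exact List.eq_nil_iff_forall_not_mem.mp (List.map_eq_nil_iff.mp hl) 0 h0
      · rw [pv_join_snoc l a, ← hl, ← ih]
        push_cast
        simp [String.append_assoc]

-- Every element of range(num) differs from num, so A's '=' branch fires only at the last element.
theorem pv_prefix_plus (num : Int) (s : String) :
    (PySem.List.pyRange 0 num 1).foldl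
        (fun s i => if i == num then s ++ PySem.Int.toStr i ++ " = "
                    else s ++ PySem.Int.toStr i ++ " + ") s
      = (PySem.List.pyRange 0 num 1).foldl (fun s i => s ++ PySem.Int.toStr i ++ " + ") s := by
  apply PySem.List.foldl_congr_mem
  intro acc x hx
  have hx' := (PySem.List.mem_pyRange_one.mp hx).2
  have : (x == num) = false := by simp; omega
  rw [this]
  simp

-- ===== VERDICT =====
theorem piramide_inversa_spec : Claim_equal_piramide_inversa := by
  intro num _ hpre
  unfold Spec_piramide_inversa piramide_inversa piramide_inversa_alt
  obtain ⟨n, rfl⟩ : ∃ n : Nat, num = (n : Int) := ⟨num.toNat, (Int.toNat_of_nonneg hpre).symm⟩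
  have hsplit : PySem.List.pyRange 0 ((n : Int) + 1) 1
      = PySem.List.pyRange 0 (n : Int) 1 ++ [(n : Int)] := by
    exact PySem.List.pyRange_one_succ_right (by positivity)
  dsimp only
  have hserie : (PySem.List.pyRange 0 ((n : Int) + 1) 1).foldl
        (fun s i => if i == (n : Int) then s ++ PySem.Int.toStr i ++ " = "
                    else s ++ PySem.Int.toStr i ++ " + ") ""
      = PySem.Str.join " + " ((PySem.List.pyRange 0 ((n : Int) + 1) 1).map PySem.Int.toStr) ++ " = " := by
    conv_lhs => rw [hsplit, List.foldl_append, pv_prefix_plus]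
    simp only [List.foldl_cons, List.foldl_nil, beq_self_eq_true, if_true]
    rw [← pv_serie_fold n]
  have htotal : (PySem.List.pyRange 0 ((n : Int) + 1) 1).foldl (fun t i => t + i) 0
      = PySem.Int.floordiv ((n : Int) * ((n : Int) + 1)) 2 := by
    rw [pv_sum_fold n]
    have hcast : (n : Int) * ((n : Int) + 1) = ((n * (n + 1) : Nat) : Int) := by push_cast; ring
    rw [hcast]
    exact_mod_cast (PySem.Int.floordiv_natCast (n * (n + 1)) 2).symm
  rw [hserie, htotal]
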